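-- pv_equiv track=rewrite | github.com/c10coding/cs112-project-3 | cowens26_243_P3.py | marble_cakes
-- ===== SOURCE A (Python) =====
-- def marble_cakes(flavor, flavor_cakes):
--     valid_flavor_cakes = flavor_cakes
--     should_add_flavor = True
--     # If flavor_cakes doesn't have flavor, then it adds it to the valid list so that I can just deal with 1 list instead of a list and a separate entity
--     for currentFlavor in flavor_cakes:
--         if currentFlavor == flavor:
--             should_add_flavor = False
--
--     if should_add_flavor:
--         valid_flavor_cakes.append(flavor)
--
--     num_combinations = 0
--     for i in range(len(valid_flavor_cakes)):
--         valid_flavor_cakes.pop()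
--         num_combinations += len(valid_flavor_cakes)
--     return num_combinations
-- ===== SOURCE B (Python) =====
-- def marble_cakes(flavor, flavor_cakes):
--     # Closed form: the pop loop just sums (n-1)+(n-2)+...+0 = n*(n-1)//2.
--     n = len(flavor_cakes)
--     if flavor not in flavor_cakes:
--         n += 1
--     flavor_cakes.clear()  # A empties the input list in place; keep that side effect
--     return n * (n - 1) // 2
-- ===== Notes on version B (the rewrite author's own statement) =====
-- stated objective: faster
-- what changed: Replaces the membership-scan loop and the pop-and-accumulate loop by a single 'in' test and the closed form n*(n-1)//2 (the list is still emptied in place, as A does).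
import Mathlib
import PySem

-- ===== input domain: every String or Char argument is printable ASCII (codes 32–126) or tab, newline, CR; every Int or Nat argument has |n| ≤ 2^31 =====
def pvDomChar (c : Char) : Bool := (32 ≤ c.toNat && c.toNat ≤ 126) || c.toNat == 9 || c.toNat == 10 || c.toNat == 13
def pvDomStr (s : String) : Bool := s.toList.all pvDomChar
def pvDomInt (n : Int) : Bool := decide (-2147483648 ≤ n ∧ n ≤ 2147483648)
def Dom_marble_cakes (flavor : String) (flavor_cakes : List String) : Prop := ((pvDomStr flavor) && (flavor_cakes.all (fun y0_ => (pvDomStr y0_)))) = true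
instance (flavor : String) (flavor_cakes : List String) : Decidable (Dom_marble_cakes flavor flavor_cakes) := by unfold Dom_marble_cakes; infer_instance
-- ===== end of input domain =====

-- B: replaces A's membership-scan loop and pop-accumulate loop by one 'in' test and the closed
-- form n*(n-1)//2; A (and B) empty the input list in place — the equivalence proved is about the
-- return value only.


-- ===== PORT A =====
-- the pop-and-accumulate loop of A: 'for i in range(len(valid))': pop the last element, add the new length
def pvPopLoop : Nat → List String × Int → List String × Int
  | 0, st => st
  | k+1, st =>
      pvPopLoop k (match PySem.List.pop? st.1 (-1) with
        | some (_, rest) => (rest, st.2 + (rest.length : Int))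
        | none => st)

-- NOTE: A mutates flavor_cakes in place (appends, then empties it); the equivalence here is about the return value only.
def marble_cakes (flavor : String) (flavor_cakes : List String) : Int :=
  let should_add_flavor :=
    flavor_cakes.foldl (fun b currentFlavor => if currentFlavor == flavor then false else b) true
  let valid_flavor_cakes := if should_add_flavor then flavor_cakes ++ [flavor] else flavor_cakes
  (pvPopLoop valid_flavor_cakes.length (valid_flavor_cakes, 0)).2

-- ===== PORT B =====
def marble_cakes_alt (flavor : String) (flavor_cakes : List String) : Int :=
  let n : Int := (flavor_cakes.length : Int) + (if flavor_cakes.contains flavor then 0 else 1)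
  PySem.Int.floordiv (n * (n - 1)) 2

-- ===== PRECONDITION & SPEC =====
def Spec_marble_cakes (flavor : String) (flavor_cakes : List String) (out : Int) : Prop := out = marble_cakes_alt flavor flavor_cakes
instance (flavor : String) (flavor_cakes : List String) (out : Int) : Decidable (Spec_marble_cakes flavor flavor_cakes out) := by unfold Spec_marble_cakes; infer_instance

-- ===== CLAIM (what is proved, stated in full; the proofs are below) =====
def Claim_equal_marble_cakes : Prop := ∀ (flavor : String) (flavor_cakes : List String), Dom_marble_cakes flavor flavor_cakes → Spec_marble_cakes flavor flavor_cakes (marble_cakes flavor flavor_cakes)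

-- ===== LEMMAS AND PROOFS =====

-- ===== VERDICT (by name: the statement is the Claim_ definition above) =====
-- should_add fold computes "flavor not in flavor_cakes"
theorem pv_fold_contains (flavor : String) : ∀ (xs : List String) (b : Bool),
    xs.foldl (fun b c => if c == flavor then false else b) b
      = (!xs.contains flavor && b) := by
  intro xs
  induction xs with
  | nil => simp
  | cons x xs ih =>
      intro b
      rw [List.foldl_cons, ih]
      by_cases h : x = flavor
      · subst h; simp
      · simp [h, Ne.symm h]

-- the pop loop sums the successive lengths: tri n = 0+1+...+(n-1)
def pvTri : Nat → Int
  | 0 => 0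
  | k+1 => pvTri k + k

theorem pv_popLoop_tri : ∀ (l : List String) (acc : Int),
    (pvPopLoop l.length (l, acc)).2 = acc + pvTri l.length := by
  intro l
  induction l using List.reverseRecOn with
  | nil => intro acc; simp [pvPopLoop, pvTri]
  | append_singleton xs x ih =>
      intro acc
      have hpop : PySem.List.pop? (xs ++ [x]) (-1) = some (x, xs) := by
        simpa using PySem.List.pop?_last xs x
      simp only [List.length_append, List.length_cons, List.length_nil]
      simp only [pvPopLoop, hpop]
      rw [ih]
      simp [pvTri]
      ring

theorem pv_tri_closed (n : Nat) : pvTri n = PySem.Int.floordiv ((n : Int) * ((n : Int) - 1)) 2 := by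
  induction n with
  | zero => simp [pvTri, PySem.Int.floordiv]
  | succ k ih =>
      have h2 : (0:Int) < 2 := by norm_num
      rw [PySem.Int.floordiv_eq_ediv_of_pos h2] at ih ⊢
      push_cast
      rw [show ((k:Int)+1)*((k:Int)+1-1) = (k:Int)*((k:Int)-1) + 2*(k:Int) by ring,
          Int.add_mul_ediv_left _ _ (by norm_num : (2:Int) ≠ 0)]
      simp [pvTri, ih]

theorem marble_cakes_spec : Claim_equal_marble_cakes := by
  intro flavor flavor_cakes _
  unfold Spec_marble_cakes marble_cakes marble_cakes_alt
  simp only [pv_fold_contains, Bool.and_true]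
  rw [pv_popLoop_tri, pv_tri_closed]
  by_cases hm : flavor ∈ flavor_cakes
  · simp [hm]
  · simp [hm]
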